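-- pv_equiv track=rewrite | github.com/vortexai2026/vortexai-backend | app/ai_outreach_writer.py | build_outreach_message
-- ===== SOURCE A (Python) =====
-- from typing import Dict, Any
--
-- def build_outreach_message(deal: Dict[str, Any], decision: str) -> Dict[str, str]:
--     asset_type = (deal.get("asset_type") or "").lower()
--     title = (deal.get("title") or "").strip()
--     location = (deal.get("location") or "").strip()
--     price = deal.get("price")
--     url = (deal.get("url") or "").strip()
--
--     intro = "Hi! Is this still available?"
--     if asset_type in ("real_estate", "house", "homes"):
--         intro = "Hi! Is this property still available?"
--     elif asset_type in ("cars", "car", "vehicle"):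
--         intro = "Hi! Is the vehicle still available?"
--     elif asset_type in ("businesses", "business"):
--         intro = "Hi! Is the business listing still available?"
--
--     if asset_type in ("real_estate", "house", "homes"):
--         questions = [
--             "Are there any major repairs needed?",
--             "Are you flexible on price if we can close quickly?",
--             "What’s the reason for selling?",
--         ]
--         subject = "Quick question about your property"
--     elif asset_type in ("cars", "car", "vehicle"):
--         questions = [
--             "Any issues with the engine or transmission?",
--             "Do you have the title/registration available?",
--             "Are you flexible on price if we can pick up quickly?",
--         ]
--         subject = "Quick question about your vehicle"
--     elif asset_type in ("businesses", "business"):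
--         questions = [
--             "What’s the reason for selling?",
--             "Is there seller financing available?",
--             "What’s the approximate monthly profit?",
--         ]
--         subject = "Quick question about your business listing"
--     else:
--         questions = [
--             "What’s the reason for selling?",
--             "Are you flexible on price if we move quickly?",
--         ]
--         subject = "Quick question about your listing"
--
--     lines = [
--         intro,
--         f"I’m interested in: {title}" if title else "I’m interested.",
--         f"Location: {location}" if location else "",
--         f"Price: {price}" if price is not None else "",
--         "",
--         "Quick questions:",
--         *[f"- {q}" for q in questions],
--         "",
--         "Thanks! Quick replies are perfect.",
--     ]
--     body = "\n".join([l for l in lines if l]).strip()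
--     if url:
--         body += f"\n\nListing link: {url}"
--
--     return {"subject": subject, "body": body}
-- ===== SOURCE B (Python) =====
-- # Template-driven rewrite: every alias maps directly to a fully pre-rendered
-- # (subject, intro, tail) record -- the questions block is pre-joined into one
-- # constant string -- and the body is accumulated by string concatenation, with
-- # no lines list, no empty-placeholder filtering, no join and no strip.
--
-- _DEFAULT = (
--     "Quick question about your listing",
--     "Hi! Is this still available?",
--     "Quick questions:\n"
--     "- What’s the reason for selling?\n"
--     "- Are you flexible on price if we move quickly?\n"
--     "Thanks! Quick replies are perfect.",
-- )
--
-- _PROPERTY = (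
--     "Quick question about your property",
--     "Hi! Is this property still available?",
--     "Quick questions:\n"
--     "- Are there any major repairs needed?\n"
--     "- Are you flexible on price if we can close quickly?\n"
--     "- What’s the reason for selling?\n"
--     "Thanks! Quick replies are perfect.",
-- )
--
-- _VEHICLE = (
--     "Quick question about your vehicle",
--     "Hi! Is the vehicle still available?",
--     "Quick questions:\n"
--     "- Any issues with the engine or transmission?\n"
--     "- Do you have the title/registration available?\n"
--     "- Are you flexible on price if we can pick up quickly?\n"
--     "Thanks! Quick replies are perfect.",
-- )
--
-- _BUSINESS = (
--     "Quick question about your business listing",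
--     "Hi! Is the business listing still available?",
--     "Quick questions:\n"
--     "- What’s the reason for selling?\n"
--     "- Is there seller financing available?\n"
--     "- What’s the approximate monthly profit?\n"
--     "Thanks! Quick replies are perfect.",
-- )
--
-- _TEMPLATES = {
--     "real_estate": _PROPERTY, "house": _PROPERTY, "homes": _PROPERTY,
--     "cars": _VEHICLE, "car": _VEHICLE, "vehicle": _VEHICLE,
--     "businesses": _BUSINESS, "business": _BUSINESS,
-- }
--
--
-- def build_outreach_message(deal, decision):
--     subject, intro, tail = _TEMPLATES.get(
--         (deal.get("asset_type") or "").lower(), _DEFAULT)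
--     title = (deal.get("title") or "").strip()
--     location = (deal.get("location") or "").strip()
--     price = deal.get("price")
--     url = (deal.get("url") or "").strip()
--
--     body = intro
--     body += "\nI’m interested in: " + title if title else "\nI’m interested."
--     if location:
--         body += "\nLocation: " + location
--     if price is not None:
--         body += f"\nPrice: {price}"
--     body += "\n" + tail
--     if url:
--         body += f"\n\nListing link: {url}"
--     return {"subject": subject, "body": body}
-- ===== Notes on version B (the rewrite author's own statement) =====
-- stated objective: simpler
-- what changed: A classifies asset_type through two separate if/elif cascades and assembles the body by building a lines list with empty placeholders, filtering them out, joining and stripping; B maps each alias directly to a fully pre-rendered (subject, intro, tail) template record whose questions block is pre-joined into one constant string, and accumulates the body by plain string concatenation with no list, no filter pass, no join and no strip.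
import Mathlib
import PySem

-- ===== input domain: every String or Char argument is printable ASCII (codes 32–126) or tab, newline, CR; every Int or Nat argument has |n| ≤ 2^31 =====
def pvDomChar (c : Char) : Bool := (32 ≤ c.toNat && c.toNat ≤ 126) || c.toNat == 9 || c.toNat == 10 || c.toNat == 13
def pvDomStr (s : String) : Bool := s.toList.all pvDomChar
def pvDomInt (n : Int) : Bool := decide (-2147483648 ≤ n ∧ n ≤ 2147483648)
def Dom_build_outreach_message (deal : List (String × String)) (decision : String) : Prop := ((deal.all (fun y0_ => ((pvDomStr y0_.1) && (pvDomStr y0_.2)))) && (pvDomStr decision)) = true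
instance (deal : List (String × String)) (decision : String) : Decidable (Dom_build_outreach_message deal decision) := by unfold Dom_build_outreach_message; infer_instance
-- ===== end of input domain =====

-- B replaces A's two if/elif cascades and its lines-list/filter/join/strip assembly by one
-- alias → pre-rendered-template lookup (the questions block pre-joined into one constant
-- string) and plain string accumulation; objective: simpler.

-- ===== PORT A =====
-- A-side helpers: A's two separate classification cascades, kept as two separate chains.
def bomIntro (asset_type : String) : String :=
  if ["real_estate", "house", "homes"].contains asset_type then
    "Hi! Is this property still available?"
  else if ["cars", "car", "vehicle"].contains asset_type then
    "Hi! Is the vehicle still available?"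
  else if ["businesses", "business"].contains asset_type then
    "Hi! Is the business listing still available?"
  else "Hi! Is this still available?"

def bomQS (asset_type : String) : List String × String :=
  if ["real_estate", "house", "homes"].contains asset_type then
    (["Are there any major repairs needed?",
      "Are you flexible on price if we can close quickly?",
      "What’s the reason for selling?"],
     "Quick question about your property")
  else if ["cars", "car", "vehicle"].contains asset_type then
    (["Any issues with the engine or transmission?",
      "Do you have the title/registration available?",
      "Are you flexible on price if we can pick up quickly?"],
     "Quick question about your vehicle")
  else if ["businesses", "business"].contains asset_type then
    (["What’s the reason for selling?",
      "Is there seller financing available?",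
      "What’s the approximate monthly profit?"],
     "Quick question about your business listing")
  else
    (["What’s the reason for selling?",
      "Are you flexible on price if we move quickly?"],
     "Quick question about your listing")

def build_outreach_message (deal : List (String × String)) (decision : String) : List (String × String) :=
  let d := PySem.Dict.ofList deal
  let asset_type := PySem.Str.lower ((d.get? "asset_type").getD "")
  let title := PySem.Str.strip ((d.get? "title").getD "")
  let location := PySem.Str.strip ((d.get? "location").getD "")
  let price := d.get? "price"
  let url := PySem.Str.strip ((d.get? "url").getD "")
  let intro := bomIntro asset_type
  let qs := bomQS asset_type
  let questions := qs.1
  let subject := qs.2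
  let lines : List String :=
    [intro,
     if title ≠ "" then "I’m interested in: " ++ title else "I’m interested.",
     if location ≠ "" then "Location: " ++ location else "",
     match price with | some p => "Price: " ++ p | none => "",
     "",
     "Quick questions:"]
    ++ questions.map (fun q => "- " ++ q)
    ++ ["", "Thanks! Quick replies are perfect."]
  let body := PySem.Str.strip (PySem.Str.join "\n" (lines.filter (fun l => l ≠ "")))
  let body := if url ≠ "" then body ++ "\n\nListing link: " ++ url else body
  [("subject", subject), ("body", body)]

-- ===== PORT B =====
-- B-side helpers: the four pre-rendered (subject, intro, tail) templates and the alias table.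
def bomDefault : String × String × String :=
  ("Quick question about your listing",
   "Hi! Is this still available?",
   "Quick questions:\n- What’s the reason for selling?\n- Are you flexible on price if we move quickly?\nThanks! Quick replies are perfect.")

def bomProperty : String × String × String :=
  ("Quick question about your property",
   "Hi! Is this property still available?",
   "Quick questions:\n- Are there any major repairs needed?\n- Are you flexible on price if we can close quickly?\n- What’s the reason for selling?\nThanks! Quick replies are perfect.")

def bomVehicle : String × String × String :=
  ("Quick question about your vehicle",
   "Hi! Is the vehicle still available?",
   "Quick questions:\n- Any issues with the engine or transmission?\n- Do you have the title/registration available?\n- Are you flexible on price if we can pick up quickly?\nThanks! Quick replies are perfect.")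

def bomBusiness : String × String × String :=
  ("Quick question about your business listing",
   "Hi! Is the business listing still available?",
   "Quick questions:\n- What’s the reason for selling?\n- Is there seller financing available?\n- What’s the approximate monthly profit?\nThanks! Quick replies are perfect.")

def bomTemplates : PySem.Dict String (String × String × String) := PySem.Dict.ofList
  [("real_estate", bomProperty), ("house", bomProperty), ("homes", bomProperty),
   ("cars", bomVehicle), ("car", bomVehicle), ("vehicle", bomVehicle),
   ("businesses", bomBusiness), ("business", bomBusiness)]

def build_outreach_message_alt (deal : List (String × String)) (decision : String) : List (String × String) :=
  let d := PySem.Dict.ofList deal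
  let rec0 := bomTemplates.getD (PySem.Str.lower ((d.get? "asset_type").getD "")) bomDefault
  let subject := rec0.1
  let intro := rec0.2.1
  let tail := rec0.2.2
  let title := PySem.Str.strip ((d.get? "title").getD "")
  let location := PySem.Str.strip ((d.get? "location").getD "")
  let price := d.get? "price"
  let url := PySem.Str.strip ((d.get? "url").getD "")
  let body := if title ≠ "" then intro ++ ("\nI’m interested in: " ++ title) else intro ++ "\nI’m interested."
  let body := if location ≠ "" then body ++ ("\nLocation: " ++ location) else body
  let body := match price with | some p => body ++ ("\nPrice: " ++ p) | none => body
  let body := body ++ ("\n" ++ tail)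
  let body := if url ≠ "" then body ++ ("\n\nListing link: " ++ url) else body
  [("subject", subject), ("body", body)]

-- ===== PRECONDITION & SPEC =====
def Spec_build_outreach_message (deal : List (String × String)) (decision : String) (out : List (String × String)) : Prop := out = build_outreach_message_alt deal decision
instance (deal : List (String × String)) (decision : String) (out : List (String × String)) : Decidable (Spec_build_outreach_message deal decision out) := by unfold Spec_build_outreach_message; infer_instance

-- ===== CLAIM (what is proved, stated in full; the proofs are below) =====
def Claim_equal_build_outreach_message : Prop := ∀ (deal : List (String × String)) (decision : String), Dom_build_outreach_message deal decision → Spec_build_outreach_message deal decision (build_outreach_message deal decision)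

-- ===== LEMMAS AND PROOFS =====
set_option maxRecDepth 40000
set_option maxHeartbeats 1000000

-- the tail string B's templates pre-render, as A computes it from the question list
def bomJ (a : String) : String :=
  PySem.Str.join "\n" ("Quick questions:" :: ((bomQS a).1.map (fun q => "- " ++ q)
    ++ ["Thanks! Quick replies are perfect."]))

-- a string with a nonempty literal prefix is nonempty
lemma pv_append_ne_empty (s t : String) (h : s.toList ≠ []) : s ++ t ≠ "" := by
  intro he
  apply h
  have : (s ++ t).toList = [] := by rw [he]; rfl
  rw [String.toList_append] at this
  exact List.eq_nil_of_append_eq_nil this |>.1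

-- join over a spine of at least two strings peels off the head
lemma pv_join_cons_cons (sep x y : String) (xs : List String) :
    PySem.Str.join sep (x :: y :: xs) = x ++ sep ++ PySem.Str.join sep (y :: xs) := by
  apply String.toList_injective
  simp [PySem.Str.join, PySem.Chars.join, List.intercalate,
        String.toList_append, String.toList_ofList]

-- strip is the identity on a string that starts with 'H' and ends with '.'
lemma pv_strip_noop (s : String)
    (h1 : s.toList.head? = some 'H') (h2 : s.toList.getLast? = some '.') :
    PySem.Str.strip s = s := by
  obtain ⟨l', hshape2⟩ := List.getLast?_eq_some_iff.mp h2
  have hshape1 : s.toList = 'H' :: s.toList.tail := by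
    cases hh : s.toList with
    | nil => rw [hh] at h1; simp at h1
    | cons c cs => rw [hh] at h1; simp at h1; simp [h1]
  have hl : PySem.Chars.lstrip s.toList = s.toList := by
    conv_lhs => rw [hshape1]
    rw [PySem.Chars.lstrip, List.dropWhile_cons,
        show PySem.Chars.isspace 'H' = false from rfl]
    simp [← hshape1]
  have hr : PySem.Chars.rstrip s.toList = s.toList := by
    conv_lhs => rw [hshape2]
    rw [PySem.Chars.rstrip]
    simp only [List.reverse_append, List.reverse_cons, List.reverse_nil, List.nil_append,
      List.cons_append, List.dropWhile_cons, show PySem.Chars.isspace '.' = false from rfl]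
    simp [← hshape2]
  have hs : PySem.Chars.strip s.toList = s.toList := by
    unfold PySem.Chars.strip; rw [hl, hr]
  apply String.toList_injective
  rw [PySem.Str.toList_strip, hs]

lemma pv_head_append (s t : String) (h : s.toList.head? = some 'H') :
    (s ++ t).toList.head? = some 'H' := by
  rw [String.toList_append]
  cases hh : s.toList with
  | nil => rw [hh] at h; simp at h
  | cons c cs => rw [hh] at h; simp at h; simp [h]

lemma pv_getLast_append (s t : String) (h : t.toList.getLast? = some '.') :
    (s ++ t).toList.getLast? = some '.' := by
  rw [String.toList_append, List.getLast?_append, h]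
  rfl

-- filtering A's line list (the empty placeholders drop out) gives a plain cons spine
lemma pv_lines_filter (t l : String) (p : Option String) (intro : String) (qs : List String)
    (hi : intro ≠ "") :
    ([intro,
      if t ≠ "" then "I’m interested in: " ++ t else "I’m interested.",
      if l ≠ "" then "Location: " ++ l else "",
      match p with | some x => "Price: " ++ x | none => "",
      "",
      "Quick questions:"]
     ++ qs.map (fun q => "- " ++ q)
     ++ ["", "Thanks! Quick replies are perfect."]).filter (fun s => s ≠ "")
    = intro :: (if t ≠ "" then "I’m interested in: " ++ t else "I’m interested.")
      :: ((if l ≠ "" then ["Location: " ++ l] else [])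
      ++ (match p with | some x => ["Price: " ++ x] | none => [])
      ++ ("Quick questions:" :: qs.map (fun q => "- " ++ q) ++ ["Thanks! Quick replies are perfect."])) := by
  by_cases ht : t = "" <;> by_cases hl : l = "" <;> cases p <;>
    simp [List.filter_append, ht, hl, hi,
          pv_append_ne_empty "I’m interested in: " t (by decide),
          pv_append_ne_empty "Location: " l (by decide),
          pv_append_ne_empty "Price: " _ (by decide)]

-- the master lemma: A's filter/join/strip body equals B's accumulated body
lemma pv_body_eq (t l : String) (p : Option String) (intro tail : String) (qs : List String)
    (hi : intro ≠ "")
    (hH : intro.toList.head? = some 'H')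
    (hD : tail.toList.getLast? = some '.')
    (htail : PySem.Str.join "\n" ("Quick questions:" :: (qs.map (fun q => "- " ++ q)
        ++ ["Thanks! Quick replies are perfect."])) = tail) :
    PySem.Str.strip (PySem.Str.join "\n"
      (([intro,
         if t ≠ "" then "I’m interested in: " ++ t else "I’m interested.",
         if l ≠ "" then "Location: " ++ l else "",
         match p with | some x => "Price: " ++ x | none => "",
         "",
         "Quick questions:"]
        ++ qs.map (fun q => "- " ++ q)
        ++ ["", "Thanks! Quick replies are perfect."]).filter (fun s => s ≠ "")))
    = (match p with
       | some x =>
         ((if l ≠ "" then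
             (if t ≠ "" then intro ++ ("\nI’m interested in: " ++ t) else intro ++ "\nI’m interested.") ++ ("\nLocation: " ++ l)
           else
             (if t ≠ "" then intro ++ ("\nI’m interested in: " ++ t) else intro ++ "\nI’m interested.")) ++ ("\nPrice: " ++ x))
       | none =>
         (if l ≠ "" then
             (if t ≠ "" then intro ++ ("\nI’m interested in: " ++ t) else intro ++ "\nI’m interested.") ++ ("\nLocation: " ++ l)
           else
             (if t ≠ "" then intro ++ ("\nI’m interested in: " ++ t) else intro ++ "\nI’m interested."))) ++ ("\n" ++ tail) := by
  rw [pv_lines_filter t l p intro qs hi]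
  by_cases ht : t = "" <;> by_cases hl : l = "" <;> cases p <;>
  · simp only [ht, hl, ne_eq, not_true_eq_false, not_false_eq_true, if_true, if_false,
      List.cons_append, List.nil_append, List.append_nil]
    rw [pv_join_cons_cons]
    try rw [pv_join_cons_cons]
    try rw [pv_join_cons_cons]
    try rw [pv_join_cons_cons]
    rw [htail]
    refine (pv_strip_noop _ ?_ ?_).trans ?_
    · repeat (first | exact hH | apply pv_head_append)
    · repeat (first | exact hD | apply pv_getLast_append)
    · apply String.toList_injective
      simp [String.toList_append]

-- per-category facts: A's cascades and the pre-joined tail equal the template record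
lemma pv_catP (a : String) (h : (["real_estate", "house", "homes"].contains a) = true) :
    bomIntro a = bomProperty.2.1 ∧ (bomQS a).2 = bomProperty.1 ∧ bomJ a = bomProperty.2.2 := by
  unfold bomJ bomIntro bomQS
  simp only [h, if_true]
  exact ⟨rfl, rfl, by decide⟩

lemma pv_catV (a : String) (h1 : (["real_estate", "house", "homes"].contains a) = false)
    (h2 : (["cars", "car", "vehicle"].contains a) = true) :
    bomIntro a = bomVehicle.2.1 ∧ (bomQS a).2 = bomVehicle.1 ∧ bomJ a = bomVehicle.2.2 := by
  unfold bomJ bomIntro bomQS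
  simp only [h1, h2, Bool.false_eq_true, if_false, if_true]
  exact ⟨rfl, rfl, by decide⟩

lemma pv_catB (a : String) (h1 : (["real_estate", "house", "homes"].contains a) = false)
    (h2 : (["cars", "car", "vehicle"].contains a) = false)
    (h3 : (["businesses", "business"].contains a) = true) :
    bomIntro a = bomBusiness.2.1 ∧ (bomQS a).2 = bomBusiness.1 ∧ bomJ a = bomBusiness.2.2 := by
  unfold bomJ bomIntro bomQS
  simp only [h1, h2, h3, Bool.false_eq_true, if_false, if_true]
  exact ⟨rfl, rfl, by decide⟩

lemma pv_catD (a : String) (h1 : (["real_estate", "house", "homes"].contains a) = false)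
    (h2 : (["cars", "car", "vehicle"].contains a) = false)
    (h3 : (["businesses", "business"].contains a) = false) :
    bomIntro a = bomDefault.2.1 ∧ (bomQS a).2 = bomDefault.1 ∧ bomJ a = bomDefault.2.2 := by
  unfold bomJ bomIntro bomQS
  simp only [h1, h2, h3, Bool.false_eq_true, if_false]
  exact ⟨rfl, rfl, by decide⟩

-- assembling the pv_key conclusion from a record's facts
lemma pv_assemble (a : String) (rec : String × String × String)
    (hg : bomTemplates.getD a bomDefault = rec)
    (h3 : bomIntro a = rec.2.1 ∧ (bomQS a).2 = rec.1 ∧ bomJ a = rec.2.2)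
    (hne : rec.2.1 ≠ "") (hh : rec.2.1.toList.head? = some 'H')
    (hl : rec.2.2.toList.getLast? = some '.') :
    bomTemplates.getD a bomDefault = ((bomQS a).2, bomIntro a, bomJ a)
    ∧ bomIntro a ≠ ""
    ∧ (bomIntro a).toList.head? = some 'H'
    ∧ (bomJ a).toList.getLast? = some '.' := by
  obtain ⟨hi, hs, hj⟩ := h3
  exact ⟨by rw [hg, hi, hs, hj], by rw [hi]; exact hne, by rw [hi]; exact hh, by rw [hj]; exact hl⟩

lemma pv_neP : bomProperty.2.1 ≠ "" := by decide
lemma pv_hhP : bomProperty.2.1.toList.head? = some 'H' := by decide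
lemma pv_hlP : bomProperty.2.2.toList.getLast? = some '.' := by decide
lemma pv_neV : bomVehicle.2.1 ≠ "" := by decide
lemma pv_hhV : bomVehicle.2.1.toList.head? = some 'H' := by decide
lemma pv_hlV : bomVehicle.2.2.toList.getLast? = some '.' := by decide
lemma pv_neB : bomBusiness.2.1 ≠ "" := by decide
lemma pv_hhB : bomBusiness.2.1.toList.head? = some 'H' := by decide
lemma pv_hlB : bomBusiness.2.2.toList.getLast? = some '.' := by decide
lemma pv_neD : bomDefault.2.1 ≠ "" := by decide
lemma pv_hhD : bomDefault.2.1.toList.head? = some 'H' := by decide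
lemma pv_hlD : bomDefault.2.2.toList.getLast? = some '.' := by decide

-- B's single table lookup yields exactly the values of A's two cascades, with the
-- tail pre-joined; plus the end-shape facts strip-elimination needs
lemma pv_key (a : String) :
    bomTemplates.getD a bomDefault = ((bomQS a).2, bomIntro a, bomJ a)
    ∧ bomIntro a ≠ ""
    ∧ (bomIntro a).toList.head? = some 'H'
    ∧ (bomJ a).toList.getLast? = some '.' := by
  by_cases h1 : a = "real_estate"
  · subst h1; exact pv_assemble _ bomProperty rfl (pv_catP _ rfl) pv_neP pv_hhP pv_hlP
  by_cases h2 : a = "house"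
  · subst h2; exact pv_assemble _ bomProperty rfl (pv_catP _ rfl) pv_neP pv_hhP pv_hlP
  by_cases h3 : a = "homes"
  · subst h3; exact pv_assemble _ bomProperty rfl (pv_catP _ rfl) pv_neP pv_hhP pv_hlP
  by_cases h4 : a = "cars"
  · subst h4; exact pv_assemble _ bomVehicle rfl (pv_catV _ rfl rfl) pv_neV pv_hhV pv_hlV
  by_cases h5 : a = "car"
  · subst h5; exact pv_assemble _ bomVehicle rfl (pv_catV _ rfl rfl) pv_neV pv_hhV pv_hlV
  by_cases h6 : a = "vehicle"
  · subst h6; exact pv_assemble _ bomVehicle rfl (pv_catV _ rfl rfl) pv_neV pv_hhV pv_hlV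
  by_cases h7 : a = "businesses"
  · subst h7; exact pv_assemble _ bomBusiness rfl (pv_catB _ rfl rfl rfl) pv_neB pv_hhB pv_hlB
  by_cases h8 : a = "business"
  · subst h8; exact pv_assemble _ bomBusiness rfl (pv_catB _ rfl rfl rfl) pv_neB pv_hhB pv_hlB
  have hc1 : (["real_estate", "house", "homes"].contains a) = false := by simp [h1, h2, h3]
  have hc2 : (["cars", "car", "vehicle"].contains a) = false := by simp [h4, h5, h6]
  have hc3 : (["businesses", "business"].contains a) = false := by simp [h7, h8]
  have hitems : bomTemplates.items =
      [("real_estate", bomProperty), ("house", bomProperty), ("homes", bomProperty),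
       ("cars", bomVehicle), ("car", bomVehicle), ("vehicle", bomVehicle),
       ("businesses", bomBusiness), ("business", bomBusiness)] := rfl
  have hal : bomTemplates.getD a bomDefault = bomDefault := by
    simp [PySem.Dict.getD, PySem.Dict.get?, hitems, h1, h2, h3, h4, h5, h6, h7, h8, Ne.symm]
  exact pv_assemble _ bomDefault hal (pv_catD _ hc1 hc2 hc3) pv_neD pv_hhD pv_hlD

-- ===== VERDICT (by name: the statement is the Claim_ definition above) =====
theorem build_outreach_message_spec : Claim_equal_build_outreach_message := by
  intro deal decision _
  unfold Spec_build_outreach_message build_outreach_message build_outreach_message_alt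
  obtain ⟨hrec, hne, hH, hD⟩ := pv_key (PySem.Str.lower (((PySem.Dict.ofList deal).get? "asset_type").getD ""))
  simp only [hrec]
  have hbody := pv_body_eq
    (PySem.Str.strip (((PySem.Dict.ofList deal).get? "title").getD ""))
    (PySem.Str.strip (((PySem.Dict.ofList deal).get? "location").getD ""))
    ((PySem.Dict.ofList deal).get? "price")
    (bomIntro (PySem.Str.lower (((PySem.Dict.ofList deal).get? "asset_type").getD "")))
    (bomJ (PySem.Str.lower (((PySem.Dict.ofList deal).get? "asset_type").getD "")))
    ((bomQS (PySem.Str.lower (((PySem.Dict.ofList deal).get? "asset_type").getD ""))).1)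
    hne hH hD rfl
  rw [hbody]
  have hassoc : ∀ e u : String, e ++ "\n\nListing link: " ++ u = e ++ ("\n\nListing link: " ++ u) :=
    fun e u => String.append_assoc
  rw [hassoc]
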